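-- pv_equiv track=rewrite | github.com/pypi-data/pypi-mirror-224 | packages/pyIBA/pyIBA-1.0-py3-none-any.whl/pyIBA/auxiliar.py | set_element_fit_symbol
-- ===== SOURCE A (Python) =====
-- def set_element_fit_symbol(formula):
-- 	formula_clean = formula[0]
--
-- 	for i in range(1, len(formula)):
-- 		if (formula[i] == ' ') and (formula[i-1].isalpha()):
-- 			formula_clean += ' ?='
-- 		else:
-- 			formula_clean += formula[i]
--
-- 	return formula_clean
-- ===== SOURCE B (Python) =====
-- import re
--
--
-- def _repl(m):
--     c = m.group(1)
--     return c + ' ?=' if c.isalpha() else m.group(0)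
--
--
-- def set_element_fit_symbol(formula):
--     return re.sub('(.) ', _repl, formula)
-- ===== Notes on version B (the rewrite author's own statement) =====
-- stated objective: faster
-- what changed: A builds the result character by character with repeated string concatenation, testing each position against its predecessor by index; B performs a single regex substitution over the whole string whose callback inserts the marker when the captured character before a space is a letter, so the scan and the assembly are done by the regex engine in one pass.
import Mathlib
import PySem

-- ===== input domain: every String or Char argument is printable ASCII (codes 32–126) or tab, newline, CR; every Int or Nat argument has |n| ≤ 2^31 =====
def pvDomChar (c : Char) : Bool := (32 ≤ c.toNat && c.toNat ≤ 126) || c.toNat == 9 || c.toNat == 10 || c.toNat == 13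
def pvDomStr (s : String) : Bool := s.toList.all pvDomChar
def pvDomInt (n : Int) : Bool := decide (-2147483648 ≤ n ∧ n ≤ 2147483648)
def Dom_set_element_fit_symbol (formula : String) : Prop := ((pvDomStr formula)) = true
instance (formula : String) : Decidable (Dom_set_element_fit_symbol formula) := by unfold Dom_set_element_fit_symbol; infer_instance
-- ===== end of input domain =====

-- B replaces A's index loop by one regex substitution re.sub('(.) ', repl, formula) whose
-- callback inserts ' ?=' after a letter-space pair (idiomatic; same return value on Pre_).

-- ===== PORT A =====
-- A's loop body: formula_clean += ' ?=' if formula[i]==' ' and formula[i-1].isalpha() else formula[i]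
def pvAStep (cs : List Char) (acc : List Char) (i : Int) : List Char :=
  match PySem.List.pyGet? cs i, PySem.List.pyGet? cs (i - 1) with
  | some c, some p =>
      if c == ' ' && PySem.Chars.isalpha p then acc ++ [' ', '?', '='] else acc ++ [c]
  | _, _ => acc   -- unreachable: i ∈ range(1, len) is always in bounds

def set_element_fit_symbol (formula : String) : String :=
  let cs := formula.toList
  -- formula_clean = formula[0]  (IndexError on the empty string: excluded by Pre_)
  let init : List Char :=
    match PySem.List.pyGet? cs 0 with
    | some c => [c]
    | none => []
  String.ofList ((PySem.List.pyRange 1 (cs.length : Int)).foldl (pvAStep cs) init)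

-- ===== PORT B =====
-- re.sub('(.) ', repl, formula): the engine scans left to right, consuming non-overlapping
-- matches of one char ('.' does not match '\n') followed by a space; the callback keeps the
-- match unless the captured char is a letter, in which case it returns char + ' ?='.
def pvSubScan : List Char → List Char
  | [] => []
  | [c] => [c]
  | c :: x :: rest =>
      if x = ' ' ∧ c ≠ '\n' then
        -- match "(.) " at the front: callback keeps it or inserts ' ?=' after a letter
        (if PySem.Chars.isalpha c then [c, ' ', '?', '='] else [c, ' ']) ++ pvSubScan rest
      else
        -- no match here ('.' does not match '\n'): the engine advances one character
        c :: pvSubScan (x :: rest)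

def set_element_fit_symbol_alt (formula : String) : String :=
  String.ofList (pvSubScan formula.toList)

-- ===== PRECONDITION & SPEC =====
-- Pre_ excludes only the empty string, on which A raises IndexError at formula[0].
def Pre_set_element_fit_symbol (formula : String) : Prop := formula ≠ ""
instance (formula : String) : Decidable (Pre_set_element_fit_symbol formula) := by
  unfold Pre_set_element_fit_symbol; infer_instance

def pvWitness_set_element_fit_symbol : String := "H + O "

def Spec_set_element_fit_symbol (formula : String) (out : String) : Prop :=
  out = set_element_fit_symbol_alt formula
instance (formula : String) (out : String) : Decidable (Spec_set_element_fit_symbol formula out) := by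
  unfold Spec_set_element_fit_symbol; infer_instance

-- ===== CLAIM (what is proved, stated in full; the proofs are below) =====
def Claim_equal_set_element_fit_symbol : Prop :=
  ∀ (formula : String), Dom_set_element_fit_symbol formula →
    Pre_set_element_fit_symbol formula →
    Spec_set_element_fit_symbol formula (set_element_fit_symbol formula)

-- ===== LEMMAS AND PROOFS =====

-- Specification of A's loop as structural recursion on the suffix after the previous char.
def pvAux (prev : Char) : List Char → List Char
  | [] => []
  | c :: rest =>
      (if c == ' ' && PySem.Chars.isalpha prev then [' ', '?', '='] else [c]) ++ pvAux c rest

-- What B computes, phrased on a whole list.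
def pvHead : List Char → List Char
  | [] => []
  | c :: rest => c :: pvAux c rest

lemma pvAux_of_not_alpha (p : Char) (h : PySem.Chars.isalpha p = false) (l : List Char) :
    pvAux p l = pvHead l := by
  cases l with
  | nil => rfl
  | cons c r => simp [pvAux, pvHead, h]

lemma pvSubScan_eq_pvHead : ∀ (n : Nat) (l : List Char), l.length ≤ n → pvSubScan l = pvHead l := by
  intro n
  induction n with
  | zero =>
      intro l hl
      have : l = [] := List.length_eq_zero_iff.mp (Nat.le_zero.mp hl)
      subst this; rfl
  | succ n ih =>
      intro l hl
      match l with
      | [] => rfl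
      | [c] => rfl
      | c :: x :: rest =>
          simp only [List.length_cons] at hl
          by_cases h : x = ' ' ∧ c ≠ '\n'
          · obtain ⟨hx, hc⟩ := h
            subst hx
            rw [pvSubScan, if_pos ⟨rfl, hc⟩]
            have h1 : pvSubScan rest = pvHead rest := by apply ih; omega
            rw [h1, ← pvAux_of_not_alpha ' ' (by decide) rest]
            by_cases ha : PySem.Chars.isalpha c
            · simp [pvHead, pvAux, ha]
            · simp [pvHead, pvAux, ha]
          · rw [pvSubScan, if_neg h]
            have h1 : pvSubScan (x :: rest) = pvHead (x :: rest) := by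
              apply ih; simp; omega
            rw [h1]
            have hcond : (x == ' ' && PySem.Chars.isalpha c) = false := by
              by_cases hx : x = ' '
              · have hc : c = '\n' := by
                  by_contra hc; exact h ⟨hx, hc⟩
                subst hx hc; decide
              · simp [hx]
            simp [pvHead, pvAux, hcond]

lemma pvA_loop (cs : List Char) :
    ∀ (suf : List Char) (pre : List Char) (p : Char) (acc : List Char),
      cs = pre ++ p :: suf →
      (PySem.List.pyRange ((pre.length + 1 : Nat) : Int) (cs.length : Int)).foldl
          (pvAStep cs) acc = acc ++ pvAux p suf := by
  intro suf
  induction suf with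
  | nil =>
      intro pre p acc hcs
      have hlen : cs.length = pre.length + 1 := by subst hcs; simp
      rw [hlen]
      have : PySem.List.pyRange ((pre.length + 1 : Nat) : Int) ((pre.length + 1 : Nat) : Int) = [] := by
        simp [PySem.List.pyRange]
      rw [this]
      simp [pvAux]
  | cons c suf' ih =>
      intro pre p acc hcs
      have hlen : cs.length = pre.length + 2 + suf'.length := by subst hcs; simp; omega
      have hlt : ((pre.length + 1 : Nat) : Int) < (cs.length : Int) := by
        rw [hlen]; push_cast; omega
      rw [PySem.List.pyRange_one_cons hlt, List.foldl_cons]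
      have hstep : pvAStep cs acc ((pre.length + 1 : Nat) : Int) =
          acc ++ (if c == ' ' && PySem.Chars.isalpha p then [' ', '?', '='] else [c]) := by
        have hget : PySem.List.pyGet? cs ((pre.length + 1 : Nat) : Int) = some c := by
          have : cs = (pre ++ [p]) ++ c :: suf' := by simpa using hcs
          rw [this]
          have := PySem.List.pyGet?_append_length (pre ++ [p]) suf' c
          simpa using this
        have hgetp : PySem.List.pyGet? cs (((pre.length + 1 : Nat) : Int) - 1) = some p := by
          have h1 : (((pre.length + 1 : Nat) : Int) - 1) = ((pre.length : Nat) : Int) := by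
            push_cast; ring
          rw [h1, hcs]
          exact PySem.List.pyGet?_append_length pre (c :: suf') p
        simp only [pvAStep, hget, hgetp]
        split_ifs <;> rfl
      rw [hstep]
      have hcs' : cs = (pre ++ [p]) ++ c :: suf' := by simpa using hcs
      have hlen' : ((pre ++ [p]).length + 1 : Nat) = (pre.length + 2 : Nat) := by simp
      have := ih (pre ++ [p]) c
        (acc ++ (if c == ' ' && PySem.Chars.isalpha p then [' ', '?', '='] else [c])) hcs'
      rw [hlen'] at this
      have h2 : ((pre.length + 1 : Nat) : Int) + 1 = ((pre.length + 2 : Nat) : Int) := by push_cast; ring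
      rw [h2, this, pvAux]
      simp

-- ===== VERDICT (by name: the statement is the Claim_ definition above) =====
theorem set_element_fit_symbol_spec : Claim_equal_set_element_fit_symbol := by
  intro formula _ hpre
  unfold Spec_set_element_fit_symbol
  unfold Pre_set_element_fit_symbol at hpre
  have hne : formula.toList ≠ [] := by
    intro h
    exact hpre (String.ext (by simp [h]))
  unfold set_element_fit_symbol set_element_fit_symbol_alt
  cases hcs : formula.toList with
  | nil => exact absurd hcs hne
  | cons c0 rest =>
      rw [pvSubScan_eq_pvHead (c0 :: rest).length _ le_rfl]
      have hget0 : PySem.List.pyGet? (c0 :: rest) (0 : Int) = some c0 :=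
        PySem.List.pyGet?_zero_cons c0 rest
      have hloop := pvA_loop (c0 :: rest) rest [] c0 [c0] (by simp)
      simp only [List.length_nil, Nat.zero_add, Nat.cast_one, List.singleton_append] at hloop
      simp only [hget0, pvHead]
      rw [hloop]
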